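-- pv_equiv track=rewrite | github.com/SYSUSELab/AdaDec | deveval_script/main.py | get_first_function
-- ===== SOURCE A (Python) =====
-- def get_first_function(code):
--     lines = code.split('\n')
--     first_function = []
--     in_function = False
--     for line in lines:
--         if not in_function and line.startswith('def '):
--             in_function = True
--             first_function.append(line)
--             continue
--         if in_function:
--             if line == '':
--                  continue
--             # 假设函数结束后有一个空行
--             if line[0]!= ' ':
--                 break
--         if in_function:
--             first_function.append(line)
--     return '\n'.join(first_function)
-- ===== SOURCE B (Python) =====
-- def get_first_function(code):
--     # locate-then-slice pipeline: find the first 'def ' line and the first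
--     # terminating line by index, then slice and filter -- no flag/break state machine
--     lines = code.split('\n')
--     hits = [(k, l) for k, l in enumerate(lines) if l.startswith('def ')]
--     if not hits:
--         return ''
--     i, header = hits[0]
--     tail = lines[i + 1:]
--     stops = [k for k, l in enumerate(tail) if l != '' and not l.startswith(' ')]
--     end = stops[0] if stops else len(tail)
--     body = [l for l in tail[:end] if l != '']
--     return '\n'.join([header] + body)
-- ===== Notes on version B (the rewrite author's own statement) =====
-- stated objective: alternative
-- what changed: Replaced A's single left-to-right scan with an in_function flag and break by a locate-then-slice pipeline: comprehensions find the index of the first 'def ' line and the first terminating line, then the body is obtained by slicing and filtering blanks.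
import Mathlib
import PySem

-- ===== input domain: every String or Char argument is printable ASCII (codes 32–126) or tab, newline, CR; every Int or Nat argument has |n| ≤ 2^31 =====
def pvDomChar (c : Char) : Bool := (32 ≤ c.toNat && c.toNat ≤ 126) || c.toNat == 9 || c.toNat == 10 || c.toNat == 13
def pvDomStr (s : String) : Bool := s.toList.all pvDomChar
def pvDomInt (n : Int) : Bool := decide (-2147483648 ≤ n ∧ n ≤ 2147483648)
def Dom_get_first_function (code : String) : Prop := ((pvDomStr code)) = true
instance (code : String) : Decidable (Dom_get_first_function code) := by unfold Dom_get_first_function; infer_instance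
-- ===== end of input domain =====

-- B replaces A's flag/break scan by a locate-then-slice pipeline (alternative decomposition, same cost).

-- ===== PORT A =====
-- literal transliteration of A's loop: state = (accumulated lines, in_function flag);
-- returning acc here = Python's 'break'.  line[0] is ported as pyGet? line 0; it is only
-- reached when line ≠ '' (the 'continue' above guards it), so the none-case cannot occur
-- and falls through to the append branch.
def pvLoopA : List String → List String → Bool → List String
  | [], acc, _ => acc
  | line :: rest, acc, inf =>
    if !inf && PySem.Str.startswith line "def " then
      pvLoopA rest (acc ++ [line]) true
    else if inf then
      if line == "" then pvLoopA rest acc inf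
      else if PySem.Str.pyGet? line 0 ≠ some ' ' then acc
      else pvLoopA rest (acc ++ [line]) inf
    else pvLoopA rest acc inf

def get_first_function (code : String) : String :=
  let lines := (PySem.Str.split? code "\n").getD []   -- sep "\n" ≠ "", so split? is always some
  PySem.Str.join "\n" (pvLoopA lines [] false)

-- ===== PORT B =====
-- helpers naming Source B's two comprehension conditions
def pvIsDef (l : String) : Bool := PySem.Str.startswith l "def "
def pvStop (l : String) : Bool := l != "" && !(PySem.Str.startswith l " ")

def get_first_function_alt (code : String) : String :=
  let lines := (PySem.Str.split? code "\n").getD []   -- sep "\n" ≠ "", so split? is always some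
  let hits := (PySem.List.enumerate lines 0).filter (fun q => pvIsDef q.2)
  match hits with
  | [] => ""
  | (i, header) :: _ =>
    let tail := PySem.List.slice lines (some (i + 1)) none
    let stops := ((PySem.List.enumerate tail 0).filter (fun q => pvStop q.2)).map (·.1)
    let e : Int := match stops with | [] => (tail.length : Int) | k :: _ => k
    let body := (PySem.List.slice tail none (some e)).filter (fun l => l != "")
    PySem.Str.join "\n" (header :: body)

-- ===== PRECONDITION & SPEC =====
def Spec_get_first_function (code : String) (out : String) : Prop := out = get_first_function_alt code
instance (code : String) (out : String) : Decidable (Spec_get_first_function code out) := by unfold Spec_get_first_function; infer_instance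

-- ===== CLAIM (what is proved, stated in full; the proofs are below) =====
def Claim_equal_get_first_function : Prop := ∀ (code : String), Dom_get_first_function code → Spec_get_first_function code (get_first_function code)

-- ===== LEMMAS AND PROOFS =====

-- For a nonempty line, A's test line[0] compared with ' ' decides B's stop condition.
theorem pvStop_char (l : String) (h : ¬ l = "") :
    PySem.List.pyGet? l.toList 0 = some ' ' ↔ pvStop l = false := by
  have hne : l.toList ≠ [] := fun hnil => h (String.toList_eq_nil_iff.mp hnil)
  cases hc : l.toList with
  | nil => exact absurd hc hne
  | cons c cs =>
    have hget : PySem.List.pyGet? (c :: cs) (0 : Int) = some c := by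
      simp [PySem.List.pyGet?, PySem.List.pyIdx?]
    have hsw : PySem.Str.startswith l " " = true ↔ c = ' ' := by
      have hsp : (" " : String).toList = [' '] := rfl
      rw [PySem.Str.startswith_eq, PySem.Chars.startswith_iff, hsp, hc]
      constructor
      · rintro ⟨t, ht⟩; simp at ht; exact ht.1.symm
      · rintro rfl; exact ⟨cs, rfl⟩
    rw [hget]
    have hbne : (l != "") = true := by simp [h]
    constructor
    · intro hcc
      have hcsp : c = ' ' := by injection hcc
      have hs2 : PySem.Chars.startswith l.toList [' '] = true := by
        simpa using hsw.mpr hcsp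
      simp [pvStop, hs2]
    · intro hb
      simp only [pvStop, hbne, Bool.true_and, Bool.not_eq_false] at hb
      have hs2 : PySem.Str.startswith l " " = true := by simpa using hb
      rw [hsw.mp hs2]

-- in-function phase of A = takeWhile-then-filter
theorem pvLoopA_true (ls : List String) : ∀ acc,
    pvLoopA ls acc true = acc ++ (ls.takeWhile (fun l => !pvStop l)).filter (fun l => l != "") := by
  induction ls with
  | nil => intro acc; simp [pvLoopA]
  | cons line rest ih =>
    intro acc
    by_cases hline : line = ""
    · subst hline
      simp [pvLoopA, pvStop, ih]
    · by_cases hstop : pvStop line = true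
      · have hg : ¬ PySem.List.pyGet? line.toList 0 = some ' ' := by
          rw [pvStop_char line hline]; simp [hstop]
        simp [pvLoopA, hline, hstop, hg]
      · simp only [Bool.not_eq_true] at hstop
        have hg : PySem.List.pyGet? line.toList 0 = some ' ' := (pvStop_char line hline).mpr hstop
        simp [pvLoopA, hline, hstop, hg, ih, List.append_assoc]

-- searching phase of A = dropWhile
theorem pvLoopA_false (ls : List String) :
    pvLoopA ls [] false =
      match ls.dropWhile (fun l => !pvIsDef l) with
      | [] => []
      | h :: t => pvLoopA t [h] true := by
  induction ls with
  | nil => simp [pvLoopA]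
  | cons line rest ih =>
    by_cases hd : pvIsDef line = true
    · have hsw : PySem.Chars.startswith line.toList ['d','e','f',' '] = true := by
        have := hd; simpa [pvIsDef, PySem.Str.startswith_eq] using this
      simp [pvLoopA, pvIsDef, PySem.Str.startswith_eq, hsw, List.dropWhile_cons, hd]
    · have hsw : PySem.Chars.startswith line.toList ['d','e','f',' '] = false := by
        have := hd; simpa [pvIsDef, PySem.Str.startswith_eq] using this
      simp [pvLoopA, pvIsDef, PySem.Str.startswith_eq, hsw, List.dropWhile_cons, ih]

-- B's filtered enumeration, described through takeWhile/dropWhile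
theorem pv_filter_enum (q : String → Bool) : ∀ (ls : List String) (s : Int),
    ((PySem.List.enumerate ls s).filter (fun p => q p.2)) =
      match ls.dropWhile (fun l => !q l) with
      | [] => []
      | h :: t => (s + ((ls.takeWhile (fun l => !q l)).length : Int), h) ::
          ((PySem.List.enumerate t (s + ((ls.takeWhile (fun l => !q l)).length : Int) + 1)).filter (fun p => q p.2)) := by
  intro ls
  induction ls with
  | nil => intro s; simp [PySem.List.enumerate_nil]
  | cons x xs ih =>
    intro s
    rw [PySem.List.enumerate_cons]
    by_cases hq : q x = true
    · simp [List.filter_cons, hq, List.dropWhile_cons]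
    · simp only [Bool.not_eq_true] at hq
      rw [List.filter_cons]
      simp only [hq, Bool.not_false, List.dropWhile_cons, List.takeWhile_cons, Bool.false_eq_true,
        if_false]
      rw [ih (s + 1)]
      cases hdw : xs.dropWhile (fun l => !q l) with
      | nil => simp
      | cons h t =>
        have harith : s + 1 + ((xs.takeWhile (fun l => !q l)).length : Int)
            = s + (((xs.takeWhile (fun l => !q l)).length : Nat) + 1 : Nat) := by
          push_cast; ring
        simp only [if_true, List.length_cons]
        rw [harith]

theorem pv_take_takeWhile {α : Type} (q : α → Bool) : ∀ (ls : List α),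
    ls.take (ls.takeWhile q).length = ls.takeWhile q := by
  intro ls
  induction ls with
  | nil => rfl
  | cons x xs ih =>
    by_cases h : q x <;> simp [h, ih]

-- B's slice tail[:end] with end = first stop index equals takeWhile (!stop)
theorem pv_slice_first_stop (t : List String) :
    PySem.List.slice t none (some
      (match ((PySem.List.enumerate t 0).filter (fun q => pvStop q.2)).map (·.1) with
       | [] => (t.length : Int) | k :: _ => k)) =
    t.takeWhile (fun l => !pvStop l) := by
  rw [pv_filter_enum pvStop t 0]
  cases hdw : t.dropWhile (fun l => !pvStop l) with
  | nil =>
    simp only [List.map_nil]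
    rw [PySem.List.slice_to t (by positivity)]
    simp only [Int.toNat_natCast, List.take_length]
    have := List.takeWhile_append_dropWhile (p := fun l => !pvStop l) (l := t)
    rw [hdw, List.append_nil] at this
    exact this.symm
  | cons h tt =>
    simp only [List.map_cons, zero_add]
    rw [PySem.List.slice_to t (by positivity)]
    simp only [Int.toNat_natCast]
    exact pv_take_takeWhile _ t

-- ===== VERDICT (by name: the statement is the Claim_ definition above) =====
theorem get_first_function_spec : Claim_equal_get_first_function := by
  intro code _
  simp only [Spec_get_first_function, get_first_function, get_first_function_alt]
  generalize (PySem.Str.split? code "\n").getD [] = ls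
  rw [pvLoopA_false, pv_filter_enum pvIsDef ls 0]
  cases hdw : ls.dropWhile (fun l => !pvIsDef l) with
  | nil =>
    simp only []
    rfl
  | cons h t =>
    simp only [zero_add]
    set n : Nat := (ls.takeWhile (fun l => !pvIsDef l)).length with hn
    have htail : PySem.List.slice ls (some ((n : Int) + 1)) none = t := by
      rw [PySem.List.slice_from ls (by positivity)]
      have hsplit : ls = ls.takeWhile (fun l => !pvIsDef l) ++ (h :: t) := by
        conv_lhs => rw [← List.takeWhile_append_dropWhile (p := fun l => !pvIsDef l) (l := ls)]
        rw [hdw]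
      have : ((n : Int) + 1).toNat = n + 1 := by omega
      rw [this, hsplit]
      rw [show n + 1 = (ls.takeWhile (fun l => !pvIsDef l)).length + 1 from by rw [hn]]
      rw [← List.drop_drop]
      rw [List.drop_left]
      simp
    rw [htail, pv_slice_first_stop t, pvLoopA_true]
    simp
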